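-- pv_equiv track=rewrite | github.com/ArminZol/Reezy-NLP-Django | processing/ml_svm_word_difficulty/quantifier.py | quantify_adjacent_vowels
-- ===== SOURCE A (Python) =====
-- vowels = ['a', 'e', 'i', 'u', 'o']
--
-- def quantify_adjacent_vowels(word):
-- 	represetation = 0
--
-- 	vowels_array = [False, False, False]
--
-- 	for letter in word:
-- 		if letter in vowels:
-- 			if not vowels_array[0]:
-- 				vowels_array[0] = True
-- 			elif not vowels_array[1]:
-- 				vowels_array[1] = True
-- 			elif not vowels_array[2]:
-- 				vowels_array[2] = True
-- 		else:
-- 			if vowels_array[0] and vowels_array[1] and not vowels_array[2]: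
-- 				represetation = 1
-- 				break
-- 			vowels_array = [False, False, False]
--
-- 	return represetation
-- ===== SOURCE B (Python) =====
-- VOWELS = "aeiou"
--
-- def quantify_adjacent_vowels(word):
--     prev_vowel = False
--     for a, b, c in zip(word, word[1:], word[2:]):
--         if not prev_vowel and a in VOWELS and b in VOWELS and c not in VOWELS:
--             return 1
--         prev_vowel = a in VOWELS
--     return 0
-- ===== Notes on version B (the rewrite author's own statement) =====
-- stated objective: simpler
-- what changed: Replaces A's three-boolean run-length state machine with break/reset bookkeeping by a single sliding-window pass over character triples (zip of the word with its two shifts) that fires when a window is consonant-boundary + vowel + vowel + consonant.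
import Mathlib
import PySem

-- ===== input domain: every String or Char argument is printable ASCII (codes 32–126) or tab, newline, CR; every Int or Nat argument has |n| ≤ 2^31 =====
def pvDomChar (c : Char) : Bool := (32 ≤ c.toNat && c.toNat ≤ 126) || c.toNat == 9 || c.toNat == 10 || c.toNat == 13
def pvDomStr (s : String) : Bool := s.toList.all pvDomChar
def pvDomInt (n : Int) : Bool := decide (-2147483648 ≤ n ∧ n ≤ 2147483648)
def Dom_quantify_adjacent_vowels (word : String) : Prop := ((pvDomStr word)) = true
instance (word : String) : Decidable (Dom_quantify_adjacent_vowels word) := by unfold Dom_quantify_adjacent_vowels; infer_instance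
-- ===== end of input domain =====

-- B replaces A's three-boolean run-length state machine by a single sliding-window
-- scan over character triples (objective: simpler); same return value on every string.

-- ===== PORT A =====
def vowelsA : List Char := ['a', 'e', 'i', 'u', 'o']

-- A's for-loop with its mutable state (vowels_array) and break/return
def goA : List Char → Bool → Bool → Bool → Int
  | [], _, _, _ => 0
  | letter :: rest, v0, v1, v2 =>
    if vowelsA.contains letter then
      if !v0 then goA rest true v1 v2
      else if !v1 then goA rest v0 true v2
      else if !v2 then goA rest v0 v1 true
      else goA rest v0 v1 v2
    else
      if v0 && v1 && !v2 then 1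
      else goA rest false false false

def quantify_adjacent_vowels (word : String) : Int :=
  goA word.toList false false false

-- ===== PORT B =====
def vowelsB : List Char := "aeiou".toList

-- B's loop over zip(word, word[1:], word[2:]) carrying prev_vowel
def goB : List Char → Bool → Int
  | a :: b :: c :: rest, prev_vowel =>
    if !prev_vowel && vowelsB.contains a && vowelsB.contains b && !(vowelsB.contains c) then 1
    else goB (b :: c :: rest) (vowelsB.contains a)
  | _, _ => 0

def quantify_adjacent_vowels_alt (word : String) : Int :=
  goB word.toList false

-- ===== PRECONDITION & SPEC =====
def Spec_quantify_adjacent_vowels (word : String) (out : Int) : Prop := out = quantify_adjacent_vowels_alt word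
instance (word : String) (out : Int) : Decidable (Spec_quantify_adjacent_vowels word out) := by unfold Spec_quantify_adjacent_vowels; infer_instance

-- ===== CLAIM (what is proved, stated in full; the proofs are below) =====
def Claim_equal_quantify_adjacent_vowels : Prop := ∀ (word : String), Dom_quantify_adjacent_vowels word → Spec_quantify_adjacent_vowels word (quantify_adjacent_vowels word)

-- ===== LEMMAS AND PROOFS =====

-- A's and B's vowel tests agree (same five characters, listed in a different order)
theorem vowels_mem (c : Char) : c ∈ vowelsA ↔ c ∈ vowelsB := by
  simp [vowelsA, vowelsB]
  tauto

-- with prev_vowel = true no window starting at the head can fire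
theorem goB_skip (x : Char) (cs : List Char) :
    goB (x :: cs) true = goB cs (vowelsB.contains x) := by
  match cs with
  | [] => simp [goB]
  | [b] => simp [goB]
  | b :: c :: t => simp [goB]

-- simultaneous invariant linking A's four reachable loop states to B's scan
theorem goA_eq_goB (cs : List Char) :
    goA cs false false false = goB cs false ∧
    goA cs true false false = goB ('a' :: cs) false ∧
    goA cs true true false = goB ('a' :: 'a' :: cs) false ∧
    goA cs true true true = goB cs true := by
  have va : 'a' ∈ vowelsB := by decide
  induction cs with
  | nil => refine ⟨rfl, rfl, rfl, rfl⟩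
  | cons c rest ih =>
    obtain ⟨ih0, ih1, ih2, ih3⟩ := ih
    by_cases hv : c ∈ vowelsB
    · have hA : c ∈ vowelsA := (vowels_mem c).2 hv
      refine ⟨?_, ?_, ?_, ?_⟩
      · -- state 000, vowel → state 100
        rw [show goA (c :: rest) false false false = goA rest true false false from by
              simp [goA, hA], ih1]
        match rest with
        | [] => simp [goB]
        | [b] => simp [goB]
        | b :: d :: t => simp [goB, hv, va]
      · -- state 100, vowel → state 110
        rw [show goA (c :: rest) true false false = goA rest true true false from by
              simp [goA, hA], ih2]
        match rest with
        | [] => simp [goB]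
        | r0 :: t => simp [goB, hv, va, goB_skip]
      · -- state 110, vowel → state 111
        rw [show goA (c :: rest) true true false = goA rest true true true from by
              simp [goA, hA], ih3]
        simp [goB, hv, va, goB_skip]
      · -- state 111, vowel → state 111
        rw [show goA (c :: rest) true true true = goA rest true true true from by
              simp [goA, hA], ih3, goB_skip]
        simp [hv]
    · have hA : c ∉ vowelsA := fun h => hv ((vowels_mem c).1 h)
      refine ⟨?_, ?_, ?_, ?_⟩
      · -- state 000, consonant → state 000
        rw [show goA (c :: rest) false false false = goA rest false false false from by
              simp [goA, hA], ih0]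
        match rest with
        | [] => simp [goB]
        | [b] => simp [goB]
        | b :: d :: t => simp [goB, hv]
      · -- state 100, consonant → state 000
        rw [show goA (c :: rest) true false false = goA rest false false false from by
              simp [goA, hA], ih0]
        match rest with
        | [] => simp [goB]
        | r0 :: t => simp [goB, hv, va, goB_skip]
      · -- state 110, consonant → break with 1
        rw [show goA (c :: rest) true true false = 1 from by simp [goA, hA]]
        simp [goB, hv, va]
      · -- state 111, consonant → state 000
        rw [show goA (c :: rest) true true true = goA rest false false false from by
              simp [goA, hA], ih0, goB_skip]
        simp [hv]

-- ===== VERDICT (by name: the statement is the Claim_ definition above) =====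
theorem quantify_adjacent_vowels_spec : Claim_equal_quantify_adjacent_vowels := by
  intro word _
  unfold Spec_quantify_adjacent_vowels quantify_adjacent_vowels quantify_adjacent_vowels_alt
  exact (goA_eq_goB word.toList).1
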